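-- pv_equiv track=rewrite | github.com/dsweet99/dryer | test/benchmark_data/module_019.py | compute_19_10
-- ===== SOURCE A (Python) =====
-- def compute_19_10(a, b, c):
--     x = a * 354 + b * 319
--     y = c * 262 - a * 247
--     for i in range(14):
--         x = x + i * 68
--         y = y - i * 40
--         if x > 7000:
--             x = x % 2000
--     return x + y + 191
-- ===== SOURCE B (Python) =====
-- def compute_19_10(a, b, c):
--     # Recursive formulation: only x depends on the branch; y's accumulation is
--     # closed-form (c*262 - a*247 - 40*(0+1+...+13) = c*262 - a*247 - 3640).
--     def step(x, i):
--         if i >= 14: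
--             return x
--         x = x + i * 68
--         return step(x % 2000 if x > 7000 else x, i + 1)
--     return step(a * 354 + b * 319, 0) + c * 262 - a * 247 - 3640 + 191
-- ===== Notes on version B (the rewrite author's own statement) =====
-- stated objective: alternative
-- what changed: Iterative joint (x,y) loop replaced by a recursive x-only accumulator; y's branch-free accumulation is folded into the closed-form constant c*262 - a*247 - 3640.
import Mathlib
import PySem

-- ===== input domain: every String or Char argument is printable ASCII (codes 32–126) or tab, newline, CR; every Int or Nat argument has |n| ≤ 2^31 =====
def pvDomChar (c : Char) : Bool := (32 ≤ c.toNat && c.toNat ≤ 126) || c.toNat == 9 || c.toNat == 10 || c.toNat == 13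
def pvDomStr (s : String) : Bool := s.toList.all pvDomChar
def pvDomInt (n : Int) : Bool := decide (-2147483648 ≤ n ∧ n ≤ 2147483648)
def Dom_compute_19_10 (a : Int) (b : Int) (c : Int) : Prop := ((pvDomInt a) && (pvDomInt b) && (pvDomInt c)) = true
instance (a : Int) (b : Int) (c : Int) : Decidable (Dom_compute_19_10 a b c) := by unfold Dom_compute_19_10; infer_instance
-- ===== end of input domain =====

-- B: recursive x-only accumulator; y's branch-free accumulation becomes the constant c*262 - a*247 - 3640 (alternative decomposition).

-- ===== PORT A =====
-- A's loop body: joint (x, y) state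
def stepA_19_10 (s : Int × Int) (i : Int) : Int × Int :=
  let x := s.1 + i * 68
  let y := s.2 - i * 40
  let x := if x > 7000 then PySem.Int.mod x 2000 else x
  (x, y)

def compute_19_10 (a : Int) (b : Int) (c : Int) : Int :=
  let x := a * 354 + b * 319
  let y := c * 262 - a * 247
  let p := (PySem.List.pyRange 0 14 1).foldl stepA_19_10 (x, y)
  p.1 + p.2 + 191

-- ===== PORT B =====
-- B's recursive helper 'step(x, i)'
def stepRec_19_10 (x : Int) (i : Nat) : Int :=
  if 14 ≤ i then x
  else
    let x := x + (i : Int) * 68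
    stepRec_19_10 (if x > 7000 then PySem.Int.mod x 2000 else x) (i + 1)
termination_by 14 - i
decreasing_by omega

def compute_19_10_alt (a : Int) (b : Int) (c : Int) : Int :=
  stepRec_19_10 (a * 354 + b * 319) 0 + c * 262 - a * 247 - 3640 + 191

-- ===== PRECONDITION & SPEC =====
def Spec_compute_19_10 (a : Int) (b : Int) (c : Int) (out : Int) : Prop := out = compute_19_10_alt a b c
instance (a : Int) (b : Int) (c : Int) (out : Int) : Decidable (Spec_compute_19_10 a b c out) := by unfold Spec_compute_19_10; infer_instance

-- ===== CLAIM (what is proved, stated in full; the proofs are below) =====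
def Claim_equal_compute_19_10 : Prop := ∀ (a : Int) (b : Int) (c : Int), Dom_compute_19_10 a b c → Spec_compute_19_10 a b c (compute_19_10 a b c)

-- ===== LEMMAS AND PROOFS =====

-- the x-component of A's loop body, as a fold step
def stepX_19_10 (x : Int) (i : Int) : Int :=
  let x := x + i * 68
  if x > 7000 then PySem.Int.mod x 2000 else x

-- A's joint (x, y) fold splits: x-component is a fold of stepX, y subtracts 40·(sum of the list).
theorem foldl_split_19_10 (l : List Int) (x y : Int) :
    l.foldl stepA_19_10 (x, y)
      = (l.foldl stepX_19_10 x, y - (l.map (fun i => i * 40)).sum) := by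
  induction l generalizing x y with
  | nil => simp
  | cons h t ih =>
    rw [List.foldl_cons, List.foldl_cons,
      show stepA_19_10 (x, y) h = (stepX_19_10 x h, y - h * 40) from rfl, ih]
    simp; ring

-- B's recursion from index i computes the fold of stepX over range(i, 14).
theorem stepRec_eq_fold_19_10 : ∀ (k i : Nat), i + k = 14 → ∀ x : Int,
    stepRec_19_10 x i = (PySem.List.pyRange i 14 1).foldl stepX_19_10 x := by
  intro k
  induction k with
  | zero =>
    intro i hi x
    rw [stepRec_19_10.eq_def]
    simp [show 14 ≤ i by omega, PySem.List.pyRange]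
  | succ m ih =>
    intro i hi x
    rw [stepRec_19_10, PySem.List.pyRange_one_cons (by omega : (i : Int) < 14)]
    simp only [show ¬ (14 ≤ i) by omega, if_false, List.foldl_cons]
    have := ih (i + 1) (by omega) (stepX_19_10 x i)
    simp only [stepX_19_10] at this
    push_cast at this ⊢
    exact this

-- ===== VERDICT (by name: the statement is the Claim_ definition above) =====
theorem compute_19_10_spec : Claim_equal_compute_19_10 := by
  intro a b c _
  simp only [Spec_compute_19_10, compute_19_10, compute_19_10_alt]
  rw [foldl_split_19_10, stepRec_eq_fold_19_10 14 0 rfl]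
  have hsum : (((PySem.List.pyRange 0 14 1).map (fun i => i * 40)).sum : Int) = 3640 := by decide
  simp only [hsum, Nat.cast_zero]
  ring
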